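-- pv_equiv track=rewrite | github.com/TanyaIgnatenko/spell-checkers-comparison | format_dataset.py | determine_error_type
-- ===== SOURCE A (Python) =====
-- def determine_error_type(correct, misspelled):
--     if len(correct) < len(misspelled):
--         return 'insertion'
--     elif len(correct) > len(misspelled):
--         return 'deletion'
--     elif len(correct) == len(misspelled):
--         # Check for transposition
--         diff_count = sum(1 for a, b in zip(correct, misspelled) if a != b)
--         if diff_count == 2 and sorted(correct) == sorted(misspelled):
--             return 'transposition'
--         else:
--             return 'substitution'
--     return 'unknown'
-- ===== SOURCE B (Python) =====
-- def determine_error_type(correct, misspelled):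
--     if len(correct) < len(misspelled):
--         return 'insertion'
--     if len(correct) > len(misspelled):
--         return 'deletion'
--     # positional check: exactly two mismatching positions whose characters are mutually swapped
--     diffs = [(a, b) for a, b in zip(correct, misspelled) if a != b]
--     if len(diffs) == 2 and diffs[0] == (diffs[1][1], diffs[1][0]):
--         return 'transposition'
--     return 'substitution'
-- ===== Notes on version B (the rewrite author's own statement) =====
-- stated objective: alternative
-- what changed: The equal-length branch detects a transposition by collecting the mismatching character pairs and checking positionally that there are exactly two and they are mutually swapped, instead of counting mismatches and comparing the sorted character multisets of the two whole strings.
import Mathlib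
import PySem

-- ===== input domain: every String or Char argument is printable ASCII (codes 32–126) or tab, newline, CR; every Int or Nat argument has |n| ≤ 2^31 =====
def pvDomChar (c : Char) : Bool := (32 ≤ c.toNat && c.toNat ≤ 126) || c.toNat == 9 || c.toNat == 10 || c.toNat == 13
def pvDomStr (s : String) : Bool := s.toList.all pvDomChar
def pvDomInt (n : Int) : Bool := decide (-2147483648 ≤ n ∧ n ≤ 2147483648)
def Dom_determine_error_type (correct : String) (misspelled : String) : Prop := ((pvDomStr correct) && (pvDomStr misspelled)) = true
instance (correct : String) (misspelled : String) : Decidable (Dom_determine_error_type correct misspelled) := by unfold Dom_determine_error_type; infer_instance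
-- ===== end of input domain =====

-- B replaces A's sorted-multiset transposition test by a positional check that the
-- (exactly two) mismatching character pairs are mutually swapped; objective: alternative.

-- ===== PORT A =====
def determine_error_type (correct : String) (misspelled : String) : String :=
  if correct.toList.length < misspelled.toList.length then "insertion"
  else if correct.toList.length > misspelled.toList.length then "deletion"
  else if correct.toList.length = misspelled.toList.length then
    -- diff_count = sum(1 for a, b in zip(correct, misspelled) if a != b)
    let diff_count : Int :=
      ((correct.toList.zip misspelled.toList).map
        (fun p => if p.1 ≠ p.2 then (1 : Int) else 0)).sum
    if diff_count = 2 ∧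
        PySem.List.sorted correct.toList (fun x => x) false =
          PySem.List.sorted misspelled.toList (fun x => x) false then
      "transposition"
    else
      "substitution"
  else "unknown"

-- ===== PORT B =====
def determine_error_type_alt (correct : String) (misspelled : String) : String :=
  if correct.toList.length < misspelled.toList.length then "insertion"
  else if correct.toList.length > misspelled.toList.length then "deletion"
  else
    -- diffs = [(a, b) for a, b in zip(correct, misspelled) if a != b]
    let diffs := (correct.toList.zip misspelled.toList).filter (fun p => decide (p.1 ≠ p.2))
    -- len(diffs) == 2 and diffs[0] == (diffs[1][1], diffs[1][0])
    match diffs with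
    | [p, q] => if p = (q.2, q.1) then "transposition" else "substitution"
    | _ => "substitution"

-- ===== PRECONDITION & SPEC =====
def Spec_determine_error_type (correct : String) (misspelled : String) (out : String) : Prop := out = determine_error_type_alt correct misspelled
instance (correct : String) (misspelled : String) (out : String) : Decidable (Spec_determine_error_type correct misspelled out) := by unfold Spec_determine_error_type; infer_instance

-- ===== CLAIM (what is proved, stated in full; the proofs are below) =====
def Claim_equal_determine_error_type : Prop := ∀ (correct : String) (misspelled : String), Dom_determine_error_type correct misspelled → Spec_determine_error_type correct misspelled (determine_error_type correct misspelled)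

-- ===== LEMMAS AND PROOFS =====

-- the pairs kept by A's equal-pair side of the partition have equal components
theorem map_fst_filter_eq_pairs (z : List (Char × Char)) :
    (z.filter (fun p => !decide (p.1 ≠ p.2))).map Prod.fst
      = (z.filter (fun p => !decide (p.1 ≠ p.2))).map Prod.snd := by
  apply List.map_congr_left
  intro p hp
  have := (List.mem_filter.mp hp).2
  simpa using this

-- the whole-string permutation test reduces to a permutation test on the mismatching pairs
theorem perm_iff_diff_perm (z : List (Char × Char)) :
    (z.map Prod.fst).Perm (z.map Prod.snd) ↔
      ((z.filter (fun p => decide (p.1 ≠ p.2))).map Prod.fst).Perm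
        ((z.filter (fun p => decide (p.1 ≠ p.2))).map Prod.snd) := by
  have hpart := List.filter_append_perm (fun p => decide (p.1 ≠ p.2)) z
  have hf : ((z.filter (fun p => decide (p.1 ≠ p.2))).map Prod.fst ++
      (z.filter (fun p => !decide (p.1 ≠ p.2))).map Prod.fst).Perm (z.map Prod.fst) := by
    simpa [List.map_append] using hpart.map Prod.fst
  have hs : ((z.filter (fun p => decide (p.1 ≠ p.2))).map Prod.snd ++
      (z.filter (fun p => !decide (p.1 ≠ p.2))).map Prod.snd).Perm (z.map Prod.snd) := by
    simpa [List.map_append] using hpart.map Prod.snd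
  constructor
  · intro h
    have h2 := hf.trans (h.trans hs.symm)
    rw [← map_fst_filter_eq_pairs z] at h2
    exact (List.perm_append_right_iff _).mp h2
  · intro h
    have h2 := (h.append_right ((z.filter (fun p => !decide (p.1 ≠ p.2))).map Prod.fst))
    rw [map_fst_filter_eq_pairs z] at h2
    -- h2 : F1 ++ E ~ F2 ++ E (with the E rewritten on the right copy)
    exact hf.symm.trans ((h.append_right _ |>.trans (by rw [map_fst_filter_eq_pairs z])).trans hs) |>.symm.symm
  
-- a two-element permutation with componentwise-distinct pairs is exactly a swap
theorem two_perm_swap (a b c d : Char) (hab : a ≠ b) (hcd : c ≠ d) :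
    [a, c].Perm [b, d] ↔ a = d ∧ c = b := by
  constructor
  · intro h
    have hb : b ∈ [a, c] := h.symm.subset (by simp)
    simp at hb
    rcases hb with hb | hb
    · exact absurd hb.symm hab
    · subst hb
      have h2 : [b, a].Perm [b, d] := (List.Perm.swap a b []).trans h
      have := h2.cons_inv
      simp at this
      exact ⟨this, rfl⟩
  · rintro ⟨rfl, rfl⟩
    exact List.Perm.swap c a []

theorem eq_branch (cs ms : List Char) (hlen : cs.length = ms.length) :
    (if ((cs.zip ms).map (fun p => if p.1 ≠ p.2 then (1 : Int) else 0)).sum = 2 ∧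
        PySem.List.sorted cs (fun x => x) false = PySem.List.sorted ms (fun x => x) false then
      "transposition" else "substitution")
    = (match (cs.zip ms).filter (fun p => decide (p.1 ≠ p.2)) with
       | [p, q] => if p = (q.2, q.1) then "transposition" else "substitution"
       | _ => "substitution") := by
  have hsum : ((cs.zip ms).map (fun p => if p.1 ≠ p.2 then (1 : Int) else 0)).sum
      = (((cs.zip ms).filter (fun p => decide (p.1 ≠ p.2))).length : Int) := by
    have h := PySem.List.sum_map_ite_one_zero (fun p : Char × Char => decide (p.1 ≠ p.2)) (cs.zip ms)
    simp only [decide_eq_true_eq] at h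
    rw [h, List.countP_eq_length_filter]
  have h1 : (cs.zip ms).map Prod.fst = cs := List.map_fst_zip (le_of_eq hlen)
  have h2 : (cs.zip ms).map Prod.snd = ms := List.map_snd_zip hlen.ge
  have hsorted : (PySem.List.sorted cs (fun x => x) false = PySem.List.sorted ms (fun x => x) false)
      ↔ (((cs.zip ms).filter (fun p => decide (p.1 ≠ p.2))).map Prod.fst).Perm
          (((cs.zip ms).filter (fun p => decide (p.1 ≠ p.2))).map Prod.snd) := by
    rw [PySem.List.sorted_id_eq_sorted_id_iff_perm, ← perm_iff_diff_perm (cs.zip ms), h1, h2]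
  have hne : ∀ x ∈ (cs.zip ms).filter (fun p => decide (p.1 ≠ p.2)), x.1 ≠ x.2 := by
    intro x hx
    simpa using (List.mem_filter.mp hx).2
  rcases hd : (cs.zip ms).filter (fun p => decide (p.1 ≠ p.2)) with _ | ⟨p, _ | ⟨q, _ | ⟨r, t⟩⟩⟩
  · -- no mismatching pair
    simp only [hsum, hd, List.length_nil]
    rw [if_neg]
    rintro ⟨hx, -⟩
    norm_num at hx
  · -- one mismatching pair
    simp only [hsum, hd, List.length_cons, List.length_nil]
    rw [if_neg]
    rintro ⟨hx, -⟩
    omega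
  · -- exactly two mismatching pairs
    obtain ⟨a, b⟩ := p
    obtain ⟨c, d⟩ := q
    have hab : a ≠ b := by simpa using hne (a, b) (by rw [hd]; simp)
    have hcd : c ≠ d := by simpa using hne (c, d) (by rw [hd]; simp)
    have hswap := two_perm_swap a b c d hab hcd
    simp only [hsum, hsorted, hd, List.map_cons, List.map_nil, List.length_cons,
      List.length_nil, hswap]
    by_cases h : a = d ∧ c = b
    · rw [if_pos ⟨by norm_num, h⟩,
        if_pos (by rw [Prod.mk.injEq]; exact ⟨h.1, h.2.symm⟩)]
    · rw [if_neg (fun hx => h hx.2),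
        if_neg (by rw [Prod.mk.injEq]; exact fun hx => h ⟨hx.1, hx.2.symm⟩)]
  · -- three or more mismatching pairs
    simp only [hsum, hd, List.length_cons]
    rw [if_neg]
    rintro ⟨hx, -⟩
    push_cast at hx
    omega

-- ===== VERDICT (by name: the statement is the Claim_ definition above) =====
theorem determine_error_type_spec : Claim_equal_determine_error_type := by
  intro correct misspelled _
  unfold Spec_determine_error_type determine_error_type determine_error_type_alt
  by_cases hlt : correct.toList.length < misspelled.toList.length
  · rw [if_pos hlt, if_pos hlt]
  · rw [if_neg hlt, if_neg hlt]
    by_cases hgt : correct.toList.length > misspelled.toList.length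
    · rw [if_pos hgt, if_pos hgt]
    · rw [if_neg hgt, if_neg hgt]
      have hlen : correct.toList.length = misspelled.toList.length := by omega
      rw [if_pos hlen]
      exact eq_branch correct.toList misspelled.toList hlen
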